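-- pv_equiv track=rewrite | github.com/Fondamenti18/fondamenti-di-programmazione | students/1798177/homework03/program01.py | get_square
-- ===== SOURCE A (Python) =====
-- def get_square(cache):
--     '''Ritorna il lato e il punto iniziale del quadrato più grande presente in
--     'cache'.
--     '''
--     max_side = cache[0][0]
--     max_row = max_column = 0
--
--     # Quando trova il numero maggiore in assoluto allora quello è il punto
--     # finale del quadrato massimale.
--     for row in range(0, len(cache)):
--         for column in range(0, len(cache[0])):
--             if max_side < cache[row][column]:
--                 max_side = cache[row][column]
--                 max_row = row
--                 max_column = column
--
--     # Non è possibile usare l'operatore -= perchè altrimenti Python effettua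
--     # prima la somma con +1.
--     max_row = max_row - max_side + 1
--     max_column = max_column - max_side + 1
--
--     # La richiesta dell'esercizio usa un sistema di coordinate inverso rispetto
--     # alla rappresentazione nel codice (le colonne e le righe sono invertite).
--     return max_side, (max_column, max_row)
-- ===== SOURCE B (Python) =====
-- def get_square(cache):
--     '''Ritorna il lato e il punto iniziale del quadrato più grande presente in
--     'cache'.
--     '''
--     width = len(cache[0])
--     cells = [cache[r][c] for r in range(len(cache)) for c in range(width)]
--     side = max(cells)
--     row, column = divmod(cells.index(side), width)
--     return side, (column - side + 1, row - side + 1)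
-- ===== Notes on version B (the rewrite author's own statement) =====
-- stated objective: alternative
-- what changed: A's single running-max loop with in-loop position bookkeeping is replaced by a flatten-then-locate decomposition: build the row-major cell list once, take max() of it, recover the first occurrence with list.index(), and get (row, column) back by divmod on the flat index.
import Mathlib
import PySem

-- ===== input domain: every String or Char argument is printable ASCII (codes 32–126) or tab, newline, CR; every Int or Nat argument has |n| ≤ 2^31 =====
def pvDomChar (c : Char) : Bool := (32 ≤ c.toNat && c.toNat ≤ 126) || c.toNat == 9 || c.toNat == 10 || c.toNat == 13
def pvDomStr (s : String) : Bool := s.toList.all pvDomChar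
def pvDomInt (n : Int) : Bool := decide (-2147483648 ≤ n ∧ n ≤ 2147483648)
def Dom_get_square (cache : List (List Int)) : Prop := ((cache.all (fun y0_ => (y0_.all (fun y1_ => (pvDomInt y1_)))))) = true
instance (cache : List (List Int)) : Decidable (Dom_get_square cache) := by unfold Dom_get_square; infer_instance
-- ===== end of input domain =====

-- B replaces A's single running-max loop (with in-loop position bookkeeping) by a
-- flatten / max / index / divmod decomposition; same cost, different structure.


-- ===== PORT A =====
-- literal port of A: running max over 'for row in range(len(cache)): for column in range(len(cache[0]))'
def get_square (cache : List (List Int)) : Int × (Int × Int) :=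
  let row0 := PySem.List.pyGetD cache 0 []
  let max_side := PySem.List.pyGetD row0 0 0
  let s :=
    (PySem.List.pyRange 0 (cache.length : Int) 1).foldl (fun (st : Int × Int × Int) row =>
      (PySem.List.pyRange 0 (row0.length : Int) 1).foldl (fun (st : Int × Int × Int) column =>
        if st.1 < PySem.List.pyGetD (PySem.List.pyGetD cache row []) column 0 then
          (PySem.List.pyGetD (PySem.List.pyGetD cache row []) column 0, row, column)
        else st) st)
      (max_side, 0, 0)
  (s.1, (s.2.2 - s.1 + 1, s.2.1 - s.1 + 1))

-- ===== PORT B =====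
-- literal port of B: flatten row-major, max(), .index(), divmod
def get_square_alt (cache : List (List Int)) : Int × (Int × Int) :=
  let width := (PySem.List.pyGetD cache 0 []).length
  let cells :=
    (PySem.List.pyRange 0 (cache.length : Int) 1).flatMap (fun r =>
      (PySem.List.pyRange 0 (width : Int) 1).map (fun c =>
        PySem.List.pyGetD (PySem.List.pyGetD cache r []) c 0))
  let side := (PySem.List.max? cells (fun x => x)).getD 0
  let idx : Nat := (PySem.List.index? cells side).getD 0
  let row := PySem.Int.floordiv (idx : Int) (width : Int)
  let column := PySem.Int.mod (idx : Int) (width : Int)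
  (side, (column - side + 1, row - side + 1))

-- ===== PRECONDITION & SPEC =====
-- Pre_ excludes exactly the inputs on which the Python A raises IndexError:
-- an empty grid, an empty first row, or a row shorter than the first row.
def Pre_get_square (cache : List (List Int)) : Prop :=
  cache ≠ [] ∧ cache.headD [] ≠ [] ∧ ∀ row ∈ cache, (cache.headD []).length ≤ row.length
instance (cache : List (List Int)) : Decidable (Pre_get_square cache) := by unfold Pre_get_square; infer_instance
def pvWitness_get_square : List (List Int) := [[1, 3], [2, 2]]

def Spec_get_square (cache : List (List Int)) (out : Int × (Int × Int)) : Prop := out = get_square_alt cache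
instance (cache : List (List Int)) (out : Int × (Int × Int)) : Decidable (Spec_get_square cache out) := by unfold Spec_get_square; infer_instance

-- ===== CLAIM (what is proved, stated in full; the proofs are below) =====
def Claim_equal_get_square : Prop := ∀ (cache : List (List Int)), Dom_get_square cache → Pre_get_square cache → Spec_get_square cache (get_square cache)

-- ===== LEMMAS AND PROOFS =====

-- A's loop body as a single fold over (value, row, column) triples
def runA (T : List (Int × Int × Int)) (st : Int × Int × Int) : Int × Int × Int :=
  T.foldl (fun st t => if st.1 < t.1 then t else st) st

theorem idxOf?_mem {l : List Int} {v : Int} (h : v ∈ l) : List.idxOf? v l = some (l.idxOf v) := by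
  induction l with
  | nil => simp at h
  | cons x t ih =>
    by_cases hx : x = v
    · subst hx; simp [List.idxOf?_cons]
    · rcases List.mem_cons.mp h with h | h
      · exact absurd h.symm hx
      · simp [List.idxOf?_cons, hx, ih h]

theorem foldl_max_eq_or_mem (l : List Int) (a : Int) :
    l.foldl max a = a ∨ l.foldl max a ∈ l := by
  induction l generalizing a with
  | nil => exact Or.inl rfl
  | cons x t ih =>
    rcases ih (max a x) with h | h
    · rw [List.foldl_cons, h]
      rcases max_cases a x with ⟨h', _⟩ | ⟨h', _⟩
      · exact Or.inl h'
      · exact Or.inr (by simp [h'])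
    · exact Or.inr (List.mem_cons_of_mem _ h)

-- characterisation of A's running-max fold: the max of the values with the initial
-- value, and the position of the first cell attaining it (or rc if none beats m)
theorem runA_spec (T : List (Int × Int × Int)) (m : Int) (rc : Int × Int) :
    runA T (m, rc) =
      ((T.map (·.1)).foldl max m,
       if (T.map (·.1)).foldl max m ≤ m then rc
       else (T.map (·.2)).getD ((T.map (·.1)).idxOf ((T.map (·.1)).foldl max m)) rc) := by
  induction T generalizing m rc with
  | nil => simp [runA]
  | cons t T ih =>
    obtain ⟨v, p⟩ := t
    have hlen : (T.map (·.1)).length = (T.map (·.2)).length := by simp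
    by_cases hm : m < v
    · have hstep : runA ((v, p) :: T) (m, rc) = runA T (v, p) := by
        simp [runA, hm]
      have hmv : max m v = v := max_eq_right hm.le
      have hvM : v ≤ (T.map (·.1)).foldl max v := (PySem.List.le_foldl_max _ v).1
      rw [hstep, ih]
      simp only [List.map_cons, List.foldl_cons, hmv]
      have hMm : ¬ (T.map (·.1)).foldl max v ≤ m := not_le.mpr (lt_of_lt_of_le hm hvM)
      rw [if_neg hMm]
      by_cases h1 : (T.map (·.1)).foldl max v ≤ v
      · have hEq : (T.map (·.1)).foldl max v = v := le_antisymm h1 hvM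
        rw [if_pos h1, hEq, List.idxOf_cons_self]
        simp
      · have hne : v ≠ (T.map (·.1)).foldl max v := fun h => h1 (le_of_eq h.symm)
        have hmem : (T.map (·.1)).foldl max v ∈ T.map (·.1) := by
          rcases foldl_max_eq_or_mem (T.map (·.1)) v with h | h
          · exact absurd h.symm hne
          · exact h
        have hlt : (T.map (·.1)).idxOf ((T.map (·.1)).foldl max v) < (T.map (·.1)).length :=
          List.idxOf_lt_length_of_mem hmem
        rw [if_neg h1, List.idxOf_cons_ne _ hne]
        rw [List.getD_eq_getElem _ _ (by simpa using hlt),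
            List.getD_eq_getElem _ _ (by simpa [← hlen] using hlt)]
        simp
    · have hstep : runA ((v, p) :: T) (m, rc) = runA T (m, rc) := by
        simp [runA, hm]
      have hmv : max m v = m := max_eq_left (not_lt.mp hm)
      rw [hstep, ih]
      simp only [List.map_cons, List.foldl_cons, hmv]
      by_cases h1 : (T.map (·.1)).foldl max m ≤ m
      · rw [if_pos h1, if_pos h1]
      · have hvm : v ≤ m := not_lt.mp hm
        have hne : v ≠ (T.map (·.1)).foldl max m := by
          intro h; exact h1 (by rw [← h]; exact hvm)
        have hmem : (T.map (·.1)).foldl max m ∈ T.map (·.1) := by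
          rcases foldl_max_eq_or_mem (T.map (·.1)) m with h | h
          · exact absurd (h ▸ le_refl _) (h ▸ h1)
          · exact h
        have hlt : (T.map (·.1)).idxOf ((T.map (·.1)).foldl max m) < (T.map (·.1)).length :=
          List.idxOf_lt_length_of_mem hmem
        rw [if_neg h1, if_neg h1, List.idxOf_cons_ne _ hne]
        rw [List.getD_eq_getElem _ _ (by simpa using hlt),
            List.getD_eq_getElem _ _ (by simpa [← hlen] using hlt)]
        simp


def gsVal (cache : List (List Int)) (r c : Nat) : Int :=
  PySem.List.pyGetD (PySem.List.pyGetD cache (r : Int) []) (c : Int) 0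

-- the row-major (value, row, column) triples A's double loop visits
def gsT (cache : List (List Int)) (n w : Nat) : List (Int × Int × Int) :=
  (List.range n).flatMap (fun r => (List.range w).map (fun c => (gsVal cache r c, (r : Int), (c : Int))))

theorem gsT_len (cache : List (List Int)) (n w : Nat) : (gsT cache n w).length = n * w := by
  simp [gsT, List.length_flatMap, List.map_const']

theorem gsT_getElem (cache : List (List Int)) (n w : Nat) (i : Nat) (hi : i < n * w) :
    (gsT cache n w)[i]'(by rw [gsT_len]; exact hi) =
      (gsVal cache (i / w) (i % w), ((i / w : Nat) : Int), ((i % w : Nat) : Int)) := by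
  induction n with
  | zero => omega
  | succ n ih =>
    have hsm : (n + 1) * w = n * w + w := by ring
    have hsplit : gsT cache (n + 1) w = gsT cache n w ++
        (List.range w).map (fun c => (gsVal cache n c, (n : Int), (c : Int))) := by
      simp [gsT, List.range_succ]
    by_cases h : i < n * w
    · rw [List.getElem_of_eq hsplit, List.getElem_append_left (by rw [gsT_len]; exact h)]
      exact ih h
    · have hw : 0 < w := by by_contra hw; omega
      have hc : i - n * w < w := by omega
      rw [List.getElem_of_eq hsplit, List.getElem_append_right (by rw [gsT_len]; omega)]
      simp only [gsT_len, List.getElem_map, List.getElem_range]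
      obtain ⟨c, hcw, rfl⟩ : ∃ c, c < w ∧ i = n * w + c := ⟨i - n * w, hc, by omega⟩
      have hdiv : (n * w + c) / w = n := by
        rw [Nat.add_comm, Nat.mul_comm, Nat.add_mul_div_left _ _ hw, Nat.div_eq_of_lt hcw,
          Nat.zero_add]
      have hmod : (n * w + c) % w = c := by
        rw [Nat.add_comm, Nat.mul_comm, Nat.add_mul_mod_self_left, Nat.mod_eq_of_lt hcw]
      have hsub : n * w + c - n * w = c := by omega
      rw [hdiv, hmod, hsub]

theorem A_eq_runA (cache : List (List Int)) :
    get_square cache =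
      (let s := runA (gsT cache cache.length (PySem.List.pyGetD cache 0 []).length)
          (PySem.List.pyGetD (PySem.List.pyGetD cache 0 []) 0 0, 0, 0)
       (s.1, (s.2.2 - s.1 + 1, s.2.1 - s.1 + 1))) := by
  unfold get_square runA gsT gsVal
  rw [List.foldl_flatMap]
  simp only [PySem.List.pyRange_zero_nat, List.foldl_map]

theorem B_cells (cache : List (List Int)) :
    (PySem.List.pyRange 0 (cache.length : Int) 1).flatMap (fun r =>
        (PySem.List.pyRange 0 (((PySem.List.pyGetD cache 0 []).length : Nat) : Int) 1).map (fun c =>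
          PySem.List.pyGetD (PySem.List.pyGetD cache r []) c 0)) =
      (gsT cache cache.length (PySem.List.pyGetD cache 0 []).length).map (·.1) := by
  unfold gsT gsVal
  simp only [PySem.List.pyRange_zero_nat, List.flatMap_map, List.map_flatMap, List.map_map]
  rfl

theorem main_eq (cache : List (List Int)) (h1 : cache ≠ []) (h2 : cache.headD [] ≠ []) :
    get_square cache = get_square_alt cache := by
  obtain ⟨r0, rest, rfl⟩ := List.exists_cons_of_ne_nil h1
  set n := (r0 :: rest).length with hn
  have hrow0 : PySem.List.pyGetD (r0 :: rest) 0 [] = r0 := by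
    simp [PySem.List.pyGetD_zero_cons]
  set w := r0.length with hw
  have hwpos : 0 < w := List.length_pos_of_ne_nil (by simpa using h2)
  have hnw : 0 < n * w := by
    have : 0 < n := by simp [hn]
    positivity
  set T := gsT (r0 :: rest) n w with hT
  set cells := T.map (·.1) with hcells
  have hclen : cells.length = n * w := by rw [hcells, List.length_map, hT, gsT_len]
  have hcell : ∀ i, i < n * w → cells[i]? = some (gsVal (r0 :: rest) (i / w) (i % w)) := by
    intro i hi
    rw [List.getElem?_eq_getElem (by rw [hclen]; exact hi)]
    simp only [hcells, List.getElem_map]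
    simp only [hT]
    rw [gsT_getElem _ _ _ _ hi]
  have hM0 : gsVal (r0 :: rest) 0 0 = PySem.List.pyGetD (PySem.List.pyGetD (r0 :: rest) 0 []) 0 0 := by
    simp [gsVal]
  -- cells is nonempty with head = the initial value of A's loop
  obtain ⟨x, t, hxt⟩ := List.exists_cons_of_ne_nil
    (l := cells) (List.ne_nil_of_length_pos (by rw [hclen]; exact hnw))
  have hx : x = gsVal (r0 :: rest) 0 0 := by
    have h0 : cells[0]? = some x := by rw [hxt]; rfl
    have h0' := hcell 0 hnw
    rw [h0, Nat.zero_div, Nat.zero_mod] at h0'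
    exact Option.some.inj h0'
  -- A's maximum equals B's maximum
  set M := cells.foldl max (gsVal (r0 :: rest) 0 0) with hMdef
  have hMB : M = t.foldl max x := by
    rw [hMdef, hxt, ← hx, List.foldl_cons, max_self]
  have hM0le : gsVal (r0 :: rest) 0 0 ≤ M :=
    (PySem.List.le_foldl_max cells _).1
  have hmem : M ∈ cells := by
    rcases foldl_max_eq_or_mem cells (gsVal (r0 :: rest) 0 0) with h | h
    · rw [hMdef, h, ← hx, hxt]; exact List.mem_cons_self
    · exact h
  set i := cells.idxOf M with hidef
  have hilt : i < n * w := by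
    rw [← hclen]; exact List.idxOf_lt_length_of_mem hmem
  have hindex : PySem.List.index? cells M = some i := by
    rw [PySem.List.index?_eq_idxOf?, idxOf?_mem hmem]
  have hMi : M = gsVal (r0 :: rest) (i / w) (i % w) := by
    have h1' := hcell i hilt
    have h2' : cells[i]? = some M := by
      rw [List.getElem?_eq_getElem (by rw [hclen]; exact hilt)]
      exact congrArg some (List.getElem_idxOf _)
    rw [h2'] at h1'
    exact Option.some.inj h1'
  -- evaluate A
  have hposl : ∀ (hlt : i < n * w),
      (T.map (·.2)).getD i ((0:Int), (0:Int)) = (((i / w : Nat) : Int), ((i % w : Nat) : Int)) := by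
    intro hlt
    rw [List.getD_eq_getElem _ _ (by simp [hT, gsT_len]; exact hlt)]
    simp only [List.getElem_map, hT]
    rw [gsT_getElem _ _ _ _ hlt]
  have hA : get_square (r0 :: rest) =
      (M, (((i % w : Nat) : Int) - M + 1, ((i / w : Nat) : Int) - M + 1)) := by
    rw [A_eq_runA]
    simp only [hrow0]
    have : (PySem.List.pyGetD r0 0 0, (0:Int), (0:Int)) =
        (gsVal (r0 :: rest) 0 0, (0:Int), (0:Int)) := by
      rw [hM0, hrow0]
    rw [this, runA_spec]
    have hTfold : (T.map (·.1)).foldl max (gsVal (r0 :: rest) 0 0) = M := by rw [← hcells]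
    rw [show gsT (r0 :: rest) (r0 :: rest).length r0.length = T by rw [hT], hTfold]
    by_cases hle : M ≤ gsVal (r0 :: rest) 0 0
    · have hMeq : M = gsVal (r0 :: rest) 0 0 := le_antisymm hle hM0le
      have hi0 : i = 0 := by
        rw [hidef, hxt, hx, ← hMeq, List.idxOf_cons_self]
      rw [if_pos hle]
      simp [hi0]
    · rw [if_neg hle, ← hcells, ← hidef, hposl hilt]
  -- evaluate B
  have hB : get_square_alt (r0 :: rest) =
      (M, (((i % w : Nat) : Int) - M + 1, ((i / w : Nat) : Int) - M + 1)) := by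
    simp only [get_square_alt]
    rw [B_cells]
    rw [hrow0, ← hn, ← hw, ← hT, ← hcells]
    rw [hxt, PySem.List.max?_id_cons, ← hxt]
    simp only [Option.getD_some, ← hMB, hindex]
    rw [show (w : Int) = ((w : Nat) : Int) from rfl]
    rw [PySem.Int.floordiv_natCast, PySem.Int.mod_natCast]
  rw [hA, hB]
-- ===== VERDICT (by name: the statement is the Claim_ definition above) =====
theorem get_square_spec : Claim_equal_get_square := by
  intro cache _ hpre
  unfold Spec_get_square
  exact main_eq cache hpre.1 hpre.2.1
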